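-- pv_equiv track=rewrite | github.com/xsasha84/PYTHON100 | slide8.py | beg2
-- ===== SOURCE A (Python) =====
-- def beg2(km, n = 100):
--     lst = []
--     d = 0
--     res = 0
--     for i in range(2, n + 1):
--         for j in range(2, i):
--             if i % j == 0:
--                 # если делитель найден, число не простое.
--                 break
--         else:
--             lst.append(i)
--     while res < km:
--         res += lst[d]
--         d += 1
--     return d
-- ===== SOURCE B (Python) =====
-- def beg2(km, n=100):
--     # Sieve of Eratosthenes-style composite marking fused with the cumulative
--     # prime sum: one pass over 2..n, no prime list, no trial division.
--     m = n if n >= 1 else 1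
--     comp = [False] * (m + 1)
--     d = 0
--     s = 0
--     for i in range(2, m + 1):
--         if not comp[i]:
--             # i is prime (never marked by a smaller divisor)
--             if s < km:
--                 s += i
--                 d += 1
--         for j in range(2 * i, m + 1, i):
--             comp[j] = True
--     return d
-- ===== Notes on version B (the rewrite author's own statement) =====
-- stated objective: faster
-- what changed: Replaces per-number trial division plus a separate while-loop over a prime list by a composite-marking sieve fused with the cumulative prime sum in a single pass (no prime list built).
import Mathlib
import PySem

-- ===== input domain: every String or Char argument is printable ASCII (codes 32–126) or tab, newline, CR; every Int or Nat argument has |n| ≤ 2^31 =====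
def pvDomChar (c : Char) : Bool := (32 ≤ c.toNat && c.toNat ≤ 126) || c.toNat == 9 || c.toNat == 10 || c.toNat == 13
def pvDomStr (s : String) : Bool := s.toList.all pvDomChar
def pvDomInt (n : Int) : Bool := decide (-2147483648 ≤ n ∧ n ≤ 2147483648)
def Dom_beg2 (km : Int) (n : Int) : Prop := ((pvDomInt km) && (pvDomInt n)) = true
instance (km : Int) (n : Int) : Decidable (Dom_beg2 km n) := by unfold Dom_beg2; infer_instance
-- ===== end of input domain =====

-- B replaces A's O(n^2) trial division + separate while-loop over a prime list by a
-- composite-marking sieve fused with the cumulative prime sum in one pass (objective: faster).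

-- ===== PORT A =====
-- inner 'for j in range(2, i): if i % j == 0: break / else: ...' — returns true iff the
-- loop completes without break (no divisor found)
def beg2NoDiv (i : Int) : List Int → Bool
  | [] => true
  | j :: rest => if PySem.Int.mod i j == 0 then false else beg2NoDiv i rest

-- 'while res < km: res += lst[d]; d += 1' — the index d walks lst left to right, so the
-- loop is transcribed as structural recursion on the suffix of lst starting at d.
-- On the empty suffix Python raises IndexError (excluded by Pre_beg2); the port returns d.
def beg2While (km : Int) : List Int → Int → Int → Int
  | [], _res, d => d
  | p :: rest, res, d => if res < km then beg2While km rest (res + p) (d + 1) else d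

def beg2 (km : Int) (n : Int) : Int :=
  let lst := (PySem.List.pyRange 2 (n + 1) 1).foldl
      (fun acc i => if beg2NoDiv i (PySem.List.pyRange 2 i 1) then acc ++ [i] else acc) []
  beg2While km lst 0 0

-- ===== PORT B =====
-- one iteration of B's outer loop; state (comp, d, s).  comp[i] is read with getD: the
-- loop index i satisfies 2 ≤ i ≤ m, so i.toNat is provably in range (comp has m+1 cells);
-- comp[j] = True is List.set at j.toNat (j ≥ 2*i ≥ 4 and j ≤ m, in range).
def beg2AltStep (km : Int) (m : Int) (st : List Bool × Int × Int) (i : Int) :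
    List Bool × Int × Int :=
  match st with
  | (comp, d, s) =>
    let ds : Int × Int :=
      if !(comp.getD i.toNat false) then
        (if s < km then (d + 1, s + i) else (d, s))
      else (d, s)
    let comp' := (PySem.List.pyRange (2 * i) (m + 1) i).foldl
        (fun c j => c.set j.toNat true) comp
    (comp', ds.1, ds.2)

def beg2_alt (km : Int) (n : Int) : Int :=
  let m := if n ≥ 1 then n else 1
  (((PySem.List.pyRange 2 (m + 1) 1).foldl (beg2AltStep km m)
      (List.replicate (m + 1).toNat false, (0 : Int), (0 : Int))).2).1

-- ===== PRECONDITION & SPEC =====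
-- trial division for Pre_ only: no divisor j of i with 2 <= j, j*j <= i; the Nat argument is
-- the explicit iteration bound (i - 1) steps, enough to reach j*j > i, so the scan is total
def beg2TrialGo (i : Int) : Nat → Int → Bool
  | 0, _ => true
  | f + 1, j => if i < j * j then true else if j ∣ i then false else beg2TrialGo i f (j + 1)

def beg2Trial (i : Int) : Bool := decide (2 ≤ i) && beg2TrialGo i (i - 1).toNat 2

-- scans i = 2..n accumulating the sum of primes, stopping as soon as it reaches km;
-- the Nat argument is the remaining length of [i, n]
def beg2SumGo (km : Int) : Nat → Int → Int → Bool
  | 0, _, acc => decide (km ≤ acc)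
  | f + 1, i, acc =>
    if km ≤ acc then true
    else beg2SumGo km f (i + 1) (acc + if beg2Trial i then i else 0)

-- 'km ≤ sum of the primes in [2, n]', computed with early exit so it decides quickly
def beg2PrimeSumReaches (km : Int) (n : Int) : Bool := beg2SumGo km (n - 1).toNat 2 0

-- Python A raises IndexError (lst[d] past the end) exactly when km exceeds the sum of all
-- primes in [2, n]; Pre_ excludes precisely those inputs.  A returns on everything else.
def Pre_beg2 (km : Int) (n : Int) : Prop := beg2PrimeSumReaches km n = true
instance (km : Int) (n : Int) : Decidable (Pre_beg2 km n) := by unfold Pre_beg2; infer_instance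

def pvWitness_beg2 : Int × Int := (10, 10)

def Spec_beg2 (km : Int) (n : Int) (out : Int) : Prop := out = beg2_alt km n
instance (km : Int) (n : Int) (out : Int) : Decidable (Spec_beg2 km n out) := by unfold Spec_beg2; infer_instance

-- ===== CLAIM (what is proved, stated in full; the proofs are below) =====
def Claim_equal_beg2 : Prop := ∀ (km : Int) (n : Int), Dom_beg2 km n → Pre_beg2 km n → Spec_beg2 km n (beg2 km n)

-- ===== LEMMAS AND PROOFS =====

-- 'i has no divisor in [2, i)': the primality test A's inner loop performs, as a predicate
def beg2IsPrime (i : Int) : Bool :=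
  (PySem.List.pyRange 2 i 1).all (fun j => !(decide (j ∣ i)))

-- the common abstract accumulator: state (d, s); add i and count while s < km
def beg2Acc (km : Int) (p : Int × Int) (i : Int) : Int × Int :=
  if p.2 < km then (p.1 + 1, p.2 + i) else p

theorem beg2NoDiv_eq_all (i : Int) (js : List Int) :
    beg2NoDiv i js = js.all (fun j => !(decide (j ∣ i))) := by
  induction js with
  | nil => rfl
  | cons j rest ih =>
    simp only [beg2NoDiv, List.all_cons, ih]
    by_cases h : j ∣ i
    · simp [(PySem.Int.mod_eq_zero_iff_dvd i j).mpr h, h]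
    · have : ¬ PySem.Int.mod i j = 0 := fun hc => h ((PySem.Int.mod_eq_zero_iff_dvd i j).mp hc)
      simp [this, h]

theorem beg2Acc_frozen (km : Int) (d res : Int) (L : List Int) (h : ¬ res < km) :
    L.foldl (beg2Acc km) (d, res) = (d, res) := by
  induction L with
  | nil => rfl
  | cons p rest ih => simp only [List.foldl_cons, beg2Acc, h, if_false]; exact ih

theorem beg2While_eq_foldl (km : Int) (L : List Int) (res d : Int) :
    beg2While km L res d = (L.foldl (beg2Acc km) (d, res)).1 := by
  induction L generalizing res d with
  | nil => rfl
  | cons p rest ih =>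
    simp only [beg2While, List.foldl_cons, beg2Acc]
    by_cases h : res < km
    · simp [h, ih]
    · simp [h, beg2Acc_frozen km d res rest h]

theorem foldlSet_length (js : List Int) (c : List Bool) :
    (js.foldl (fun c j => c.set j.toNat true) c).length = c.length := by
  induction js generalizing c with
  | nil => rfl
  | cons j rest ih => simp [List.foldl_cons, ih]

theorem setD_getD (c : List Bool) (k x : Nat) :
    ((c.set k true).getD x false = true) ↔
      (c.getD x false = true ∨ (x = k ∧ x < c.length)) := by
  rw [List.getD_eq_getElem?_getD, List.getD_eq_getElem?_getD, List.getElem?_set]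
  by_cases he : k = x
  · subst he
    by_cases hl : k < c.length
    · simp [hl]
    · simp [hl]
  · simp [he]
    exact fun h => absurd h.symm he

theorem foldlSet_getD (js : List Int) (c : List Bool) (x : Nat) :
    ((js.foldl (fun c j => c.set j.toNat true) c).getD x false = true) ↔
      (c.getD x false = true ∨ ∃ j ∈ js, j.toNat = x ∧ x < c.length) := by
  induction js generalizing c with
  | nil => simp
  | cons j rest ih =>
    simp only [List.foldl_cons, ih, List.length_set, setD_getD, List.mem_cons]
    constructor
    · rintro ((h | ⟨hx, hl⟩) | ⟨j', hj', hx, hlen⟩)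
      · exact Or.inl h
      · exact Or.inr ⟨j, Or.inl rfl, hx.symm, hl⟩
      · exact Or.inr ⟨j', Or.inr hj', hx, hlen⟩
    · rintro (h | ⟨j', hj' | hj', hx, hlen⟩)
      · exact Or.inl (Or.inl h)
      · subst hj'; exact Or.inl (Or.inr ⟨hx.symm, hlen⟩)
      · exact Or.inr ⟨j', hj', hx, hlen⟩

theorem two_mul_le_of_dvd (a x : Int) (ha : 0 < a) (hd : a ∣ x) (hlt : a < x) :
    2 * a ≤ x := by
  obtain ⟨k, rfl⟩ := hd
  have hk : 2 ≤ k := by nlinarith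
  nlinarith

theorem beg2IsPrime_iff (i : Int) :
    beg2IsPrime i = true ↔ ∀ j : Int, 2 ≤ j → j < i → ¬ j ∣ i := by
  simp [beg2IsPrime, List.all_eq_true, PySem.List.mem_pyRange_one]

theorem beg2_sieve (km m : Int) (k : Nat) :
    ∀ (a : Int), 2 ≤ a → a + (k : Int) = m + 1 →
    ∀ (comp : List Bool) (d s : Int),
      comp.length = (m + 1).toNat →
      (∀ x : Int, 2 ≤ x → x ≤ m →
        (comp.getD x.toNat false = true ↔ ∃ j : Int, 2 ≤ j ∧ j < a ∧ j < x ∧ j ∣ x)) →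
      ((PySem.List.pyRange a (m + 1) 1).foldl (beg2AltStep km m) (comp, d, s)).2
        = ((PySem.List.pyRange a (m + 1) 1).filter beg2IsPrime).foldl (beg2Acc km) (d, s) := by
  induction k with
  | zero =>
    intro a h2 hk comp d s _ _
    rw [PySem.List.pyRange_one_eq_nil (by omega)]
    rfl
  | succ k ih =>
    intro a h2 hk comp d s hlen hinv
    have ham : a ≤ m := by omega
    rw [PySem.List.pyRange_one_cons (by omega : a < m + 1)]
    -- the read comp[a] equals !beg2IsPrime a
    have hread : comp.getD a.toNat false = !(beg2IsPrime a) := by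
      have h1 := hinv a h2 ham
      cases hb : beg2IsPrime a with
      | false =>
        have : ∃ j : Int, 2 ≤ j ∧ j < a ∧ j ∣ a := by
          by_contra hc
          push_neg at hc
          exact absurd ((beg2IsPrime_iff a).mpr (fun j hj2 hja hd => hc j hj2 hja hd)) (by simp [hb])
        obtain ⟨j, hj2, hja, hjd⟩ := this
        simp only [Bool.not_false]
        exact h1.mpr ⟨j, hj2, hja, hja, hjd⟩
      | true =>
        simp only [Bool.not_true]
        by_contra hc
        have hT : comp.getD a.toNat false = true := by
          cases hcomp : comp.getD a.toNat false
          · exact absurd hcomp hc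
          · rfl
        obtain ⟨j, hj2, hja, _, hjd⟩ := h1.mp hT
        exact ((beg2IsPrime_iff a).mp hb) j hj2 hja hjd
    -- the marked array and its invariant at a+1
    set comp' := (PySem.List.pyRange (2 * a) (m + 1) a).foldl
        (fun c j => c.set j.toNat true) comp with hcomp'
    have hlen' : comp'.length = (m + 1).toNat := by rw [hcomp', foldlSet_length]; exact hlen
    have hinv' : ∀ x : Int, 2 ≤ x → x ≤ m →
        (comp'.getD x.toNat false = true ↔ ∃ j : Int, 2 ≤ j ∧ j < a + 1 ∧ j < x ∧ j ∣ x) := by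
      intro x hx2 hxm
      rw [hcomp', foldlSet_getD]
      have hmem : (∃ j ∈ PySem.List.pyRange (2 * a) (m + 1) a, j.toNat = x.toNat ∧ x.toNat < comp.length)
          ↔ (a ∣ x ∧ 2 * a ≤ x) := by
        constructor
        · rintro ⟨j, hj, hjx, _⟩
          rw [PySem.List.mem_pyRange_iff_of_pos (by omega)] at hj
          obtain ⟨hj1, hj2', hj3⟩ := hj
          have hjeq : j = x := by omega
          subst hjeq
          have : a ∣ j := by
            have := dvd_add hj3 (dvd_mul_left a 2)
            simpa using this
          exact ⟨this, hj1⟩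
        · rintro ⟨hdvd, hge⟩
          refine ⟨x, ?_, by omega, by omega⟩
          rw [PySem.List.mem_pyRange_iff_of_pos (by omega)]
          refine ⟨hge, by omega, ?_⟩
          exact dvd_sub hdvd (dvd_mul_left a 2)
      rw [hmem, hinv x hx2 hxm]
      constructor
      · rintro (⟨j, hj2, hja, hjx, hjd⟩ | ⟨hdvd, hge⟩)
        · exact ⟨j, hj2, by omega, hjx, hjd⟩
        · exact ⟨a, h2, by omega, by omega, hdvd⟩
      · rintro ⟨j, hj2, hja1, hjx, hjd⟩
        by_cases hcase : j < a
        · exact Or.inl ⟨j, hj2, hcase, hjx, hjd⟩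
        · have hja : j = a := by omega
          subst hja
          exact Or.inr ⟨hjd, two_mul_le_of_dvd j x (by omega) hjd hjx⟩
    rw [List.foldl_cons, List.filter_cons]
    have ih' := fun d' s' => ih (a + 1) (by omega) (by push_cast; omega) comp' d' s' hlen' hinv'
    cases hb : beg2IsPrime a with
    | false =>
      have hstep : beg2AltStep km m (comp, d, s) a = (comp', d, s) := by
        simp only [beg2AltStep]
        rw [hread, hb]
        simp [hcomp']
      rw [hstep]
      simpa using ih' d s
    | true =>
      have hstep : beg2AltStep km m (comp, d, s) a =
          (comp', (if s < km then (d + 1, s + a) else (d, s)).1,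
                  (if s < km then (d + 1, s + a) else (d, s)).2) := by
        simp only [beg2AltStep]
        rw [hread, hb]
        simp [hcomp']
      rw [hstep]
      have hacc : beg2Acc km (d, s) a = if s < km then (d + 1, s + a) else (d, s) := by
        simp [beg2Acc]
      simp only [if_true, List.foldl_cons, hacc]
      by_cases hs : s < km
      · simpa [hs] using ih' (d + 1) (s + a)
      · simpa [hs] using ih' d s

theorem beg2_alt_eq (km n : Int) :
    beg2_alt km n =
      (((PySem.List.pyRange 2 ((if n ≥ 1 then n else 1) + 1) 1).filter beg2IsPrime).foldl
        (beg2Acc km) (0, 0)).1 := by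
  have hm : (1 : Int) ≤ (if n ≥ 1 then n else 1) := by split <;> omega
  set m := if n ≥ 1 then n else 1 with hmdef
  have h := beg2_sieve km m (m - 1).toNat 2 (by omega) (by omega)
      (List.replicate (m + 1).toNat false) 0 0 (by simp)
      (by
        intro x hx2 hxm
        constructor
        · intro h
          simp [List.getD_eq_getElem?_getD] at h
        · rintro ⟨j, hj2, hja, _, _⟩; omega)
  simp only [beg2_alt, ← hmdef]
  rw [h]

theorem range_eq_range (n : Int) :
    PySem.List.pyRange 2 (n + 1) 1 = PySem.List.pyRange 2 ((if n ≥ 1 then n else 1) + 1) 1 := by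
  by_cases h : n ≥ 1
  · simp [h]
  · rw [if_neg h, PySem.List.pyRange_one_eq_nil (by omega),
        PySem.List.pyRange_one_eq_nil (by omega)]

theorem beg2_eq (km n : Int) :
    beg2 km n =
      (((PySem.List.pyRange 2 (n + 1) 1).filter beg2IsPrime).foldl (beg2Acc km) (0, 0)).1 := by
  have hfun : (fun i => beg2NoDiv i (PySem.List.pyRange 2 i 1)) = beg2IsPrime := by
    funext i
    rw [beg2NoDiv_eq_all]
    rfl
  simp only [beg2, PySem.List.foldl_append_if_eq_filter, List.nil_append, hfun,
    beg2While_eq_foldl]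

-- ===== VERDICT (by name: the statement is the Claim_ definition above) =====
theorem beg2_spec : Claim_equal_beg2 := by
  intro km n _ _
  unfold Spec_beg2
  rw [beg2_eq, beg2_alt_eq, range_eq_range]
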